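-- pv_equiv track=rewrite | github.com/Bailsy/CodeWars | codeWars15.py | controller
-- ===== SOURCE A (Python) =====
-- def controller(events):
--     eventDialog = ""
--     P = False
--     C = 0
--     O = False
--
--     Closed = True
--     Opening = False
--     for i in events:
--
--         if C == 0:
--             Closed = True
--             Opening = False
--         elif C == 5:
--             Closed = False
--             Opening = False
--         else:
--             Opening = True
--
--
--
--         if i == "." and P == False and Closed == True:
--             eventDialog += "0"
--
--         if i == "P":
--             P = True
--
--         if P == True and Closed == True:
--             C += 1
--             eventDialog += str(C)
--
--
--
--
--
--
--
--     return eventDialog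
-- ===== SOURCE B (Python) =====
-- def controller(events):
--     events = list(events)
--     if "P" in events:
--         p = events.index("P")
--         return "0" * events[:p].count(".") + "12345"[:len(events) - p]
--     return "0" * events.count(".")
-- ===== Notes on version B (the rewrite author's own statement) =====
-- stated objective: simpler
-- what changed: Replaces the stateful event loop (flags P/C/Closed/Opening) with a closed form: dots before the first 'P' each emit '0', then the prefix of '12345' of length len(events)-p (capped at 5) is appended.
import Mathlib
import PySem

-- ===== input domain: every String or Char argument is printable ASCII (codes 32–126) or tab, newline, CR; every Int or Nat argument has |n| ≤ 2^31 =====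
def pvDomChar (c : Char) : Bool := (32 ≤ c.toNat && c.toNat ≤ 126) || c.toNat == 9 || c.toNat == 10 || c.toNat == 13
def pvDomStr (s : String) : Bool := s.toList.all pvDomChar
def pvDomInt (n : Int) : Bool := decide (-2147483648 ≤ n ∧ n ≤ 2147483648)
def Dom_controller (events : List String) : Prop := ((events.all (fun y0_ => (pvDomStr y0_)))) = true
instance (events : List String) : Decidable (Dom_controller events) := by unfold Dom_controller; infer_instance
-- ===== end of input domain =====

-- B replaces A's stateful loop (flags P/C/Closed/Opening) by a closed form from the position of the first "P"; objective: simpler.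

-- ===== PORT A =====
-- state = (eventDialog as chars, P, C, Closed, Opening); the unused variable O of A is dropped
def controllerStep : (List Char × Bool × Int × Bool × Bool) → String → (List Char × Bool × Int × Bool × Bool)
  | (d, P, C, Closed, _Opening), i =>
    let CO : Bool × Bool :=
      if C == 0 then (true, false)
      else if C == 5 then (false, false)
      else (Closed, true)
    let Closed := CO.1
    let Opening := CO.2
    let d := if i == "." && !P && Closed then d ++ ['0'] else d
    let P := if i == "P" then true else P
    if P && Closed then (d ++ PySem.Int.toChars (C + 1), P, C + 1, Closed, Opening)
    else (d, P, C, Closed, Opening)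

def controller (events : List String) : String :=
  String.mk (events.foldl controllerStep ([], false, 0, true, false)).1

-- ===== PORT B =====
def controller_alt (events : List String) : String :=
  match PySem.List.index? events "P" with
  | some p =>
      String.mk (List.replicate (PySem.List.count (PySem.List.slice events none (some (p : Int))) ".") '0'
        ++ PySem.Chars.slice ['1','2','3','4','5'] none (some ((events.length : Int) - (p : Int))))
  | none => String.mk (List.replicate (PySem.List.count events ".") '0')

-- ===== PRECONDITION & SPEC =====
def Spec_controller (events : List String) (out : String) : Prop := out = controller_alt events
instance (events : List String) (out : String) : Decidable (Spec_controller events out) := by unfold Spec_controller; infer_instance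

-- ===== CLAIM (what is proved, stated in full; the proofs are below) =====
def Claim_equal_controller : Prop := ∀ (events : List String), Dom_controller events → Spec_controller events (controller events)

-- ===== LEMMAS AND PROOFS =====

-- before any "P": each "." appends '0', all flags stay put
lemma foldl_pre (pre : List String) (hP : "P" ∉ pre) (d : List Char) (op : Bool) :
    ∃ op', pre.foldl controllerStep (d, false, 0, true, op)
      = (d ++ List.replicate (PySem.List.count pre ".") '0', false, 0, true, op') := by
  induction pre generalizing d op with
  | nil => exact ⟨op, by simp⟩
  | cons x xs ih =>
    have hx : x ≠ "P" := fun h => hP (h ▸ List.mem_cons_self)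
    have hxs : "P" ∉ xs := fun h => hP (List.mem_cons_of_mem _ h)
    by_cases hdot : x = "."
    · subst hdot
      obtain ⟨op', h⟩ := ih hxs (d ++ ['0']) false
      refine ⟨op', ?_⟩
      simp [List.foldl_cons, controllerStep, PySem.List.count, h, List.replicate_succ]
    · obtain ⟨op', h⟩ := ih hxs d false
      refine ⟨op', ?_⟩
      simp [List.foldl_cons, controllerStep, hx, hdot, PySem.List.count, h]

-- saturated: once C = 5 with Closed already false the state is frozen
lemma foldl_sat (ys : List String) (d : List Char) :
    ys.foldl controllerStep (d, true, 5, false, false) = (d, true, 5, false, false) := by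
  induction ys with
  | nil => rfl
  | cons y ys ih => simp [List.foldl_cons, controllerStep, ih]

-- counting phase: with P set, Closed true and 1 ≤ c ≤ 5, digits c+1 … min(c+|ys|,5) are appended
lemma foldl_post (ys : List String) (d : List Char) (op : Bool) (c : Nat) (h1 : 1 ≤ c) (h5 : c ≤ 5) :
    ∃ cl' op', ys.foldl controllerStep (d, true, (c : Int), true, op)
      = (d ++ (List.drop c ['1','2','3','4','5']).take ys.length, true,
         ((min (c + ys.length) 5 : Nat) : Int), cl', op') := by
  induction ys generalizing d op c with
  | nil =>
    refine ⟨true, op, ?_⟩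
    simp
    omega
  | cons y ys ih =>
    by_cases hc5 : c = 5
    · refine ⟨false, false, ?_⟩
      have h0 : ((c : Int) == 0) = false := by simp; omega
      have h5'' : ((c : Int) == 5) = true := by simp; omega
      have hst : controllerStep (d, true, (c : Int), true, op) y = (d, true, 5, false, false) := by
        simp only [controllerStep, h0, h5'']
        simp
        omega
      rw [List.foldl_cons, hst, foldl_sat]
      subst hc5
      simp
    · have hstep : controllerStep (d, true, (c : Int), true, op) y
          = (d ++ PySem.Int.toChars ((c + 1 : Nat) : Int), true, ((c + 1 : Nat) : Int), true, true) := by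
        have h0 : ((c : Int) == 0) = false := by simp; omega
        have h5' : ((c : Int) == 5) = false := by simp; omega
        have hcast : ((c : Int) + 1) = ((c + 1 : Nat) : Int) := by push_cast; ring
        simp only [controllerStep, h0, h5']
        simp only [Bool.false_eq_true, if_false, Bool.and_self, Bool.not_true, Bool.and_false,
          Bool.false_and, if_pos, ite_self, hcast]
      obtain ⟨cl', op', h⟩ := ih (d ++ PySem.Int.toChars ((c + 1 : Nat) : Int)) true (c + 1)
        (by omega) (by omega)
      refine ⟨cl', op', ?_⟩
      rw [List.foldl_cons, hstep, h]
      have hmin : min (c + 1 + ys.length) 5 = min (c + (y :: ys).length) 5 := by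
        simp; omega
      rw [hmin]
      have h4 : c ≤ 4 := by omega
      have hdig : d ++ PySem.Int.toChars ((c + 1 : Nat) : Int)
            ++ (List.drop (c + 1) ['1','2','3','4','5']).take ys.length
          = d ++ (List.drop c ['1','2','3','4','5']).take (y :: ys).length := by
        clear hc5 h5 ih hstep h hmin
        interval_cases c <;>
          simp [List.take_succ_cons, show PySem.Int.toChars 2 = ['2'] from by decide,
            show PySem.Int.toChars 3 = ['3'] from by decide,
            show PySem.Int.toChars 4 = ['4'] from by decide,
            show PySem.Int.toChars 5 = ['5'] from by decide]
      rw [hdig]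

-- ===== VERDICT (by name: the statement is the Claim_ definition above) =====
theorem controller_spec : Claim_equal_controller := by
  intro events _
  unfold Spec_controller controller controller_alt
  rcases h : PySem.List.index? events "P" with _ | p
  · -- no "P": every dot emits a '0'
    have hnot : "P" ∉ events := (PySem.List.index?_eq_none_iff events "P").mp h
    obtain ⟨op', hfold⟩ := foldl_pre events hnot [] false
    simp [hfold]
  · obtain ⟨pre, suf, hev, hlen, hnp⟩ := ((PySem.List.index?_eq_some_iff events "P" p).mp h)
    subst hev
    subst hlen
    obtain ⟨op', hpre⟩ := foldl_pre pre hnp [] false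
    rw [List.nil_append] at hpre
    have hstepP : controllerStep
        (List.replicate (PySem.List.count pre ".") '0', false, 0, true, op') "P"
        = (List.replicate (PySem.List.count pre ".") '0' ++ ['1'], true, 1, true, false) := by
      simp [controllerStep]; rfl
    obtain ⟨cl', op'', hpost⟩ := foldl_post suf
      (List.replicate (PySem.List.count pre ".") '0' ++ ['1']) false 1 (by omega) (by omega)
    simp only [Nat.cast_one] at hpost
    have hA : ((pre ++ "P" :: suf).foldl controllerStep ([], false, 0, true, false)).1
        = List.replicate (PySem.List.count pre ".") '0'
          ++ '1' :: (List.drop 1 ['1','2','3','4','5']).take suf.length := by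
      rw [List.foldl_append, hpre, List.foldl_cons, hstepP, hpost]
      simp
    rw [hA]
    -- B side
    have hslice : PySem.List.slice (pre ++ "P" :: suf) none (some ((pre.length : Int)))
        = pre := by
      rw [PySem.List.slice_to_natCast]
      exact List.take_left
    have hlen2 : ((pre ++ "P" :: suf).length : Int) - (pre.length : Int)
        = ((suf.length + 1 : Nat) : Int) := by
      simp
    simp only [hslice, hlen2, PySem.Chars.slice_eq_listSlice, PySem.List.slice_to_natCast]
    congr 1
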